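-- pv_equiv track=rewrite | github.com/smaurice69/adventofcode | 2017/day21.py | combine_blocks
-- ===== SOURCE A (Python) =====
-- from typing import List, Optional
-- import math
--
-- Grid = List[List[str]]  # 2D grid of characters
--
-- def combine_blocks(blocks: List[Grid]) -> Grid:
--     """
--     Combine equally-sized square blocks into one big grid.
--
--     `blocks` is a flat list in row-major order:
--         [ b00, b01, ..., b0N,
--           b10, b11, ..., b1N,
--           ...
--         ]
--     """
--     if not blocks:
--         return []
--
--     block_size = len(blocks[0])            # e.g. 3 or 4
--     num_blocks = len(blocks)
--     blocks_per_row = int(math.isqrt(num_blocks))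
--
--     if blocks_per_row * blocks_per_row != num_blocks:
--         raise ValueError(f"Number of blocks ({num_blocks}) is not a perfect square")
--
--     final_size = blocks_per_row * block_size
--     combined: Grid = [[""] * final_size for _ in range(final_size)]
--
--     for idx, block in enumerate(blocks):
--         br = idx // blocks_per_row        # block row
--         bc = idx % blocks_per_row         # block col
--         for r in range(block_size):
--             for c in range(block_size):
--                 combined[br * block_size + r][bc * block_size + c] = block[r][c]
--
--     return combined
-- ===== SOURCE B (Python) =====
-- import math
-- from typing import List
--
-- Grid = List[List[str]]
--
--
-- def combine_blocks(blocks: List[Grid]) -> Grid: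
--     """Combine equally-sized square blocks into one big grid, band by band."""
--     if not blocks:
--         return []
--
--     block_size = len(blocks[0])
--     blocks_per_row = int(math.isqrt(len(blocks)))
--
--     if blocks_per_row * blocks_per_row != len(blocks):
--         raise ValueError(
--             f"Number of blocks ({len(blocks)}) is not a perfect square"
--         )
--
--     combined: Grid = []
--     for br in range(blocks_per_row):
--         band = blocks[br * blocks_per_row:(br + 1) * blocks_per_row]
--         for r in range(block_size):
--             combined.append(
--                 [block[r][c] for block in band for c in range(block_size)]
--             )
--     return combined
-- ===== Notes on version B (the rewrite author's own statement) =====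
-- stated objective: idiomatic
-- what changed: B builds the combined grid band by band, forming each output row by concatenating the r-th rows of the band's blocks, instead of A's scatter-writing every cell into a preallocated matrix indexed by idx//bpr and idx%bpr.
import Mathlib
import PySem

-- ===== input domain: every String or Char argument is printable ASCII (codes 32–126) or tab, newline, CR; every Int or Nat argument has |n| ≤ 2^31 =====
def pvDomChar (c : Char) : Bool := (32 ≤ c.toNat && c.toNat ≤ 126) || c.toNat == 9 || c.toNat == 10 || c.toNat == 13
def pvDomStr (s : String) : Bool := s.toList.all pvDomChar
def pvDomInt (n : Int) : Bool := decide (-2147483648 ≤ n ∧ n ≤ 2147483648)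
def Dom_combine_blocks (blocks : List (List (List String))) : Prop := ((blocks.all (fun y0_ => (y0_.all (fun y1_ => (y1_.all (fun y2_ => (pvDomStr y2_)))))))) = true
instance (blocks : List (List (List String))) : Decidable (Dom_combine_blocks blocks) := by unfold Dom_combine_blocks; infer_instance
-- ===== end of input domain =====

-- B rebuilds the grid band by band, each output row being the concatenation of the band's block
-- rows, instead of A's scatter-writes into a preallocated matrix; more idiomatic, same cost.

-- ===== PORT A =====
-- combined[i][j] = v  (always in range under Pre_; a no-op/default where Python would raise, which Pre_ excludes)
def pvSet2 (g : List (List String)) (i j : Nat) (v : String) : List (List String) :=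
  g.set i ((g.getD i []).set j v)

-- the body of A's 'for idx, block in enumerate(blocks)' loop
def pvWriteBlock (n bpr : Nat) (comb : List (List String)) (p : (List (List String)) × Nat) : List (List String) :=
  let block := p.1
  let br := p.2 / bpr
  let bc := p.2 % bpr
  (List.range n).foldl (fun comb r =>
    (List.range n).foldl (fun comb c =>
      pvSet2 comb (br * n + r) (bc * n + c) ((block.getD r []).getD c "")) comb) comb

def combine_blocks (blocks : List (List (List String))) : List (List String) :=
  if blocks = [] then []
  else
    let block_size := (blocks.headD []).length
    let num_blocks := blocks.length
    let blocks_per_row := Nat.sqrt num_blocks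
    if blocks_per_row * blocks_per_row ≠ num_blocks then []  -- Python raises ValueError here (outside Pre_)
    else
      let final_size := blocks_per_row * block_size
      let init := List.replicate final_size (List.replicate final_size "")
      blocks.zipIdx.foldl (pvWriteBlock block_size blocks_per_row) init

-- ===== PORT B =====
-- one output row: the r-th rows of the band's blocks, block_size cells from each
def pvBandRow (n : Nat) (band : List (List (List String))) (r : Nat) : List String :=
  band.flatMap (fun block => (List.range n).map (fun c => (block.getD r []).getD c ""))

def combine_blocks_alt (blocks : List (List (List String))) : List (List String) :=
  if blocks = [] then []
  else
    let block_size := (blocks.headD []).length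
    let blocks_per_row := Nat.sqrt blocks.length
    if blocks_per_row * blocks_per_row ≠ blocks.length then []  -- Python raises ValueError here (outside Pre_)
    else
      (List.range blocks_per_row).foldl (fun comb br =>
        (List.range block_size).foldl (fun comb r =>
          comb ++ [pvBandRow block_size ((blocks.drop (br * blocks_per_row)).take blocks_per_row) r]) comb) []

-- ===== PRECONDITION & SPEC =====
-- Pre_ excludes exactly the inputs on which the Python A raises: a non-perfect-square number of
-- blocks (ValueError), and blocks with fewer than block_size rows or with a row shorter than
-- block_size among their first block_size rows (IndexError on block[r][c]).
def Pre_combine_blocks (blocks : List (List (List String))) : Prop :=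
  blocks = [] ∨
  ((∃ k < blocks.length + 1, k * k = blocks.length) ∧
   ∀ b ∈ blocks, (blocks.headD []).length ≤ b.length ∧
     ∀ row ∈ b.take (blocks.headD []).length, (blocks.headD []).length ≤ row.length)
instance (blocks : List (List (List String))) : Decidable (Pre_combine_blocks blocks) := by
  unfold Pre_combine_blocks; infer_instance

def pvWitness_combine_blocks : List (List (List String)) :=
  [[["#", "."], [".", "#"]], [[".", "."], ["#", "#"]], [["#", "#"], [".", "."]], [[".", "#"], ["#", "."]]]

def Spec_combine_blocks (blocks : List (List (List String))) (out : List (List String)) : Prop := out = combine_blocks_alt blocks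
instance (blocks : List (List (List String))) (out : List (List String)) : Decidable (Spec_combine_blocks blocks out) := by unfold Spec_combine_blocks; infer_instance

-- ===== CLAIM (what is proved, stated in full; the proofs are below) =====
def Claim_equal_combine_blocks : Prop := ∀ (blocks : List (List (List String))), Dom_combine_blocks blocks → Pre_combine_blocks blocks → Spec_combine_blocks blocks (combine_blocks blocks)

-- ===== LEMMAS AND PROOFS =====

-- read cell (i, j), with defaults
def gg (g : List (List String)) (i j : Nat) : String := (g.getD i []).getD j ""

-- the value of cell (i, j) of the combined grid
def pvV (blocks : List (List (List String))) (n bpr i j : Nat) : String :=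
  ((blocks.getD (i / n * bpr + j / n) []).getD (i % n) []).getD (j % n) ""

-- common closed form both ports are reduced to
def pvCF (blocks : List (List (List String))) (n bpr : Nat) : List (List String) :=
  (List.range (bpr * n)).map (fun i => (List.range (bpr * n)).map (fun j => pvV blocks n bpr i j))

theorem div_mod_unique' (a b c d q : Nat) (hb : b < q) (hd : d < q)
    (h : a * q + b = c * q + d) : a = c ∧ b = d := by
  have h1 : a = c := by
    rcases Nat.lt_trichotomy a c with h' | h' | h'
    · nlinarith
    · exact h'
    · nlinarith
  subst h1
  exact ⟨rfl, by omega⟩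

theorem div_eq_iff_range (i br n : Nat) (hn : 0 < n) :
    i / n = br ↔ br * n ≤ i ∧ i < br * n + n := by
  have h1 := Nat.div_add_mod i n
  have h2 := Nat.mod_lt i hn
  constructor
  · intro h
    rw [h] at h1
    have h3 : n * br = br * n := Nat.mul_comm n br
    omega
  · rintro ⟨hle, hlt⟩
    exact Nat.div_eq_of_lt_le hle (by rw [add_one_mul]; omega)

theorem sub_of_div_eq (i br n : Nat) (h : i / n = br) : i - br * n = i % n := by
  have h1 := Nat.div_add_mod i n
  rw [h] at h1
  have h2 : n * br = br * n := Nat.mul_comm n br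
  omega

theorem len_pvSet2 (g : List (List String)) (i j : Nat) (v : String) :
    (pvSet2 g i j v).length = g.length := by
  simp [pvSet2]

theorem rowlen_pvSet2 (g : List (List String)) (i j : Nat) (v : String) (t : Nat) :
    ((pvSet2 g i j v).getD t []).length = (g.getD t []).length := by
  simp only [pvSet2, List.getD_eq_getElem?_getD, List.getElem?_set]
  split_ifs with h1 h2
  · subst h1
    simp only [Option.getD_some, List.length_set, List.getElem?_eq_getElem h2]
  · subst h1
    have hg : g[i]? = none := by
      rw [List.getElem?_eq_none_iff]
      omega
    simp only [hg, Option.getD_none]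
  · rfl

theorem gg_pvSet2_self (g : List (List String)) (i j : Nat) (v : String)
    (hi : i < g.length) (hj : j < (g.getD i []).length) :
    gg (pvSet2 g i j v) i j = v := by
  unfold gg pvSet2
  have h1 : (g.set i ((g.getD i []).set j v)).getD i [] = (g.getD i []).set j v := by
    rw [List.getD_eq_getElem _ [] (by simpa using hi)]
    exact List.getElem_set_self (by simpa using hi)
  rw [h1, List.getD_eq_getElem _ "" (by simpa using hj)]
  exact List.getElem_set_self (by simpa using hj)

theorem gg_pvSet2_ne (g : List (List String)) (i j i' j' : Nat) (v : String)
    (h : i ≠ i' ∨ j ≠ j') :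
    gg (pvSet2 g i j v) i' j' = gg g i' j' := by
  unfold gg pvSet2
  by_cases hii : i = i'
  · subst hii
    have hjj : j ≠ j' := by tauto
    by_cases hlen : i < g.length
    · have h1 : (g.set i ((g.getD i []).set j v)).getD i [] = (g.getD i []).set j v := by
        rw [List.getD_eq_getElem _ [] (by simpa using hlen)]
        exact List.getElem_set_self (by simpa using hlen)
      rw [h1]
      simp only [List.getD_eq_getElem?_getD, List.getElem?_set]
      rw [if_neg hjj]
    · have h1 : (g.set i ((g.getD i []).set j v)).getD i [] = g.getD i [] := by
        have hg : g[i]? = none := by rw [List.getElem?_eq_none_iff]; omega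
        simp [List.getD_eq_getElem?_getD, hlen]
      rw [h1]
  · have h1 : (g.set i ((g.getD i []).set j v)).getD i' [] = g.getD i' [] := by
      simp only [List.getD_eq_getElem?_getD, List.getElem?_set, if_neg hii]
    rw [h1]

-- the inner 'for c in range(...)' loop, abstracted
def foldCol (g : List (List String)) (i j0 : Nat) (f : Nat → String) (m : Nat) : List (List String) :=
  (List.range m).foldl (fun g c => pvSet2 g i (j0 + c) (f c)) g

theorem foldCol_succ (g : List (List String)) (i j0 : Nat) (f : Nat → String) (m : Nat) :
    foldCol g i j0 f (m + 1) = pvSet2 (foldCol g i j0 f m) i (j0 + m) (f m) := by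
  simp [foldCol, List.range_succ, List.foldl_append]

theorem len_foldCol (g : List (List String)) (i j0 : Nat) (f : Nat → String) (m : Nat) :
    (foldCol g i j0 f m).length = g.length := by
  induction m with
  | zero => simp [foldCol]
  | succ m ih => rw [foldCol_succ, len_pvSet2, ih]

theorem rowlen_foldCol (g : List (List String)) (i j0 : Nat) (f : Nat → String) (m t : Nat) :
    ((foldCol g i j0 f m).getD t []).length = (g.getD t []).length := by
  induction m with
  | zero => simp [foldCol]
  | succ m ih => rw [foldCol_succ, rowlen_pvSet2, ih]

theorem gg_foldCol (g : List (List String)) (i j0 : Nat) (f : Nat → String) (m i' j' : Nat)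
    (hi : i < g.length) (hrow : j0 + m ≤ (g.getD i []).length) :
    gg (foldCol g i j0 f m) i' j' =
      if i' = i ∧ j0 ≤ j' ∧ j' < j0 + m then f (j' - j0) else gg g i' j' := by
  induction m with
  | zero =>
    simp only [foldCol, List.range_zero, List.foldl_nil]
    rw [if_neg (by omega)]
  | succ m ih =>
    rw [foldCol_succ]
    have hiG : i < (foldCol g i j0 f m).length := by rw [len_foldCol]; exact hi
    have hrG : j0 + m < ((foldCol g i j0 f m).getD i []).length := by
      rw [rowlen_foldCol]; omega
    by_cases hc : i' = i ∧ j' = j0 + m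
    · obtain ⟨h1, h2⟩ := hc
      subst h1; subst h2
      rw [gg_pvSet2_self _ _ _ _ hiG hrG, if_pos ⟨rfl, by omega, by omega⟩]
      have he : j0 + m - j0 = m := by omega
      rw [he]
    · have hne : i ≠ i' ∨ j0 + m ≠ j' := by
        by_cases h1 : i' = i
        · subst h1; right; intro h2; exact hc ⟨rfl, h2.symm⟩
        · left; intro h2; exact h1 h2.symm
      rw [gg_pvSet2_ne _ _ _ _ _ _ hne, ih (by omega)]
      by_cases hcc : i' = i ∧ j0 ≤ j' ∧ j' < j0 + m
      · rw [if_pos hcc, if_pos ⟨hcc.1, hcc.2.1, by omega⟩]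
      · have hcc2 : ¬(i' = i ∧ j0 ≤ j' ∧ j' < j0 + (m + 1)) := by
          intro h1
          by_cases h2 : j' = j0 + m
          · exact hc ⟨h1.1, h2⟩
          · exact hcc ⟨h1.1, h1.2.1, by omega⟩
        rw [if_neg hcc, if_neg hcc2]

-- the 'for r in range(...)' loop writing one block, abstracted
def foldRows (block : List (List String)) (br bc n m : Nat) (g : List (List String)) :
    List (List String) :=
  (List.range m).foldl
    (fun g r => foldCol g (br * n + r) (bc * n) (fun c => (block.getD r []).getD c "") n) g

theorem pvWriteBlock_eq (n bpr : Nat) (g : List (List String)) (block : List (List String))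
    (idx : Nat) :
    pvWriteBlock n bpr g (block, idx) = foldRows block (idx / bpr) (idx % bpr) n n g := by
  rfl

theorem foldRows_succ (block : List (List String)) (br bc n m : Nat) (g : List (List String)) :
    foldRows block br bc n (m + 1) g =
      foldCol (foldRows block br bc n m g) (br * n + m) (bc * n)
        (fun c => (block.getD m []).getD c "") n := by
  simp [foldRows, List.range_succ, List.foldl_append]

theorem len_foldRows (block : List (List String)) (br bc n m : Nat) (g : List (List String)) :
    (foldRows block br bc n m g).length = g.length := by
  induction m with
  | zero => simp [foldRows]
  | succ m ih => rw [foldRows_succ, len_foldCol, ih]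

theorem rowlen_foldRows (block : List (List String)) (br bc n m : Nat) (g : List (List String))
    (t : Nat) :
    ((foldRows block br bc n m g).getD t []).length = (g.getD t []).length := by
  induction m with
  | zero => simp [foldRows]
  | succ m ih => rw [foldRows_succ, rowlen_foldCol, ih]

theorem gg_foldRows (block : List (List String)) (br bc n m : Nat) (g : List (List String))
    (i j : Nat) (hS : br * n + m ≤ g.length)
    (hrows : ∀ t, t < g.length → bc * n + n ≤ (g.getD t []).length) :
    gg (foldRows block br bc n m g) i j =
      if br * n ≤ i ∧ i < br * n + m ∧ bc * n ≤ j ∧ j < bc * n + n then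
        (block.getD (i - br * n) []).getD (j - bc * n) ""
      else gg g i j := by
  induction m with
  | zero =>
    simp only [foldRows, List.range_zero, List.foldl_nil]
    rw [if_neg (by omega)]
  | succ m ih =>
    rw [foldRows_succ]
    have hlG : br * n + m < (foldRows block br bc n m g).length := by
      rw [len_foldRows]; omega
    have hrowG : bc * n + n ≤ ((foldRows block br bc n m g).getD (br * n + m) []).length := by
      rw [rowlen_foldRows]
      exact hrows (br * n + m) (by omega)
    rw [gg_foldCol _ _ _ _ _ _ _ hlG hrowG, ih (by omega)]
    by_cases hc : i = br * n + m ∧ bc * n ≤ j ∧ j < bc * n + n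
    · rw [if_pos hc, if_pos ⟨by omega, by omega, hc.2.1, hc.2.2⟩]
      have he : i - br * n = m := by omega
      rw [he]
    · by_cases hcc : br * n ≤ i ∧ i < br * n + m ∧ bc * n ≤ j ∧ j < bc * n + n
      · rw [if_neg hc, if_pos hcc, if_pos ⟨hcc.1, by omega, hcc.2.2.1, hcc.2.2.2⟩]
      · rw [if_neg hc, if_neg hcc, if_neg (by omega)]

theorem len_pvWriteBlock (n bpr : Nat) (g : List (List String))
    (p : (List (List String)) × Nat) : (pvWriteBlock n bpr g p).length = g.length := by
  obtain ⟨block, idx⟩ := p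
  rw [pvWriteBlock_eq, len_foldRows]

theorem rowlen_pvWriteBlock (n bpr : Nat) (g : List (List String))
    (p : (List (List String)) × Nat) (t : Nat) :
    ((pvWriteBlock n bpr g p).getD t []).length = (g.getD t []).length := by
  obtain ⟨block, idx⟩ := p
  rw [pvWriteBlock_eq, rowlen_foldRows]

theorem gg_pvWriteBlock (n bpr : Nat) (hn : 0 < n) (g : List (List String))
    (block : List (List String)) (idx i j : Nat)
    (hg : g.length = bpr * n) (hrows : ∀ t, t < bpr * n → (g.getD t []).length = bpr * n)
    (hidx : idx < bpr * bpr) (hi : i < bpr * n) (hj : j < bpr * n) :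
    gg (pvWriteBlock n bpr g (block, idx)) i j =
      if i / n = idx / bpr ∧ j / n = idx % bpr then
        (block.getD (i % n) []).getD (j % n) ""
      else gg g i j := by
  have hbpr : 0 < bpr := by
    rcases Nat.eq_zero_or_pos bpr with h | h
    · subst h; simp at hidx
    · exact h
  have hbr : idx / bpr < bpr := (Nat.div_lt_iff_lt_mul hbpr).2 hidx
  have hbc : idx % bpr < bpr := Nat.mod_lt _ hbpr
  have hS : idx / bpr * n + n ≤ g.length := by
    rw [hg]
    have h1 : (idx / bpr + 1) * n ≤ bpr * n := Nat.mul_le_mul_right n (by omega)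
    rw [add_one_mul] at h1
    omega
  have hrows' : ∀ t, t < g.length → idx % bpr * n + n ≤ (g.getD t []).length := by
    intro t ht
    rw [hg] at ht
    rw [hrows t ht]
    have h1 : (idx % bpr + 1) * n ≤ bpr * n := Nat.mul_le_mul_right n (by omega)
    rw [add_one_mul] at h1
    omega
  rw [pvWriteBlock_eq, gg_foldRows _ _ _ _ _ _ _ _ hS hrows']
  by_cases hc : i / n = idx / bpr ∧ j / n = idx % bpr
  · have hri := (div_eq_iff_range i (idx / bpr) n hn).1 hc.1
    have hrj := (div_eq_iff_range j (idx % bpr) n hn).1 hc.2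
    rw [if_pos ⟨hri.1, hri.2, hrj.1, hrj.2⟩, if_pos hc]
    rw [sub_of_div_eq i _ n hc.1, sub_of_div_eq j _ n hc.2]
  · rw [if_neg hc]
    rw [if_neg]
    intro h
    exact hc ⟨(div_eq_iff_range i (idx / bpr) n hn).2 ⟨h.1, h.2.1⟩,
              (div_eq_iff_range j (idx % bpr) n hn).2 ⟨h.2.2.1, h.2.2.2⟩⟩

theorem len_foldTop (n bpr : Nat) (bs : List (List (List String))) (k : Nat)
    (g : List (List String)) :
    ((bs.zipIdx k).foldl (pvWriteBlock n bpr) g).length = g.length := by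
  induction bs generalizing k g with
  | nil => simp
  | cons b bs ih =>
    rw [List.zipIdx_cons, List.foldl_cons, ih, len_pvWriteBlock]

theorem rowlen_foldTop (n bpr : Nat) (bs : List (List (List String))) (k : Nat)
    (g : List (List String)) (t : Nat) :
    (((bs.zipIdx k).foldl (pvWriteBlock n bpr) g).getD t []).length = (g.getD t []).length := by
  induction bs generalizing k g with
  | nil => simp
  | cons b bs ih =>
    rw [List.zipIdx_cons, List.foldl_cons, ih, rowlen_pvWriteBlock]

theorem gg_foldTop (n bpr : Nat) (hn : 0 < n) (bs : List (List (List String))) (k : Nat)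
    (g : List (List String)) (i j : Nat)
    (hk : k + bs.length ≤ bpr * bpr) (hg : g.length = bpr * n)
    (hrows : ∀ t, t < bpr * n → (g.getD t []).length = bpr * n)
    (hi : i < bpr * n) (hj : j < bpr * n) :
    gg ((bs.zipIdx k).foldl (pvWriteBlock n bpr) g) i j =
      if k ≤ i / n * bpr + j / n ∧ i / n * bpr + j / n < k + bs.length then
        ((bs.getD (i / n * bpr + j / n - k) []).getD (i % n) []).getD (j % n) ""
      else gg g i j := by
  induction bs generalizing k g with
  | nil =>
    rw [if_neg (by simp only [List.length_nil]; omega)]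
    simp
  | cons b bs ih =>
    rw [List.zipIdx_cons, List.foldl_cons]
    have hbpr : 0 < bpr := by
      rcases Nat.eq_zero_or_pos bpr with h | h
      · subst h; simp at hk
      · exact h
    have hg' : (pvWriteBlock n bpr g (b, k)).length = bpr * n := by
      rw [len_pvWriteBlock, hg]
    have hrows' : ∀ t, t < bpr * n → ((pvWriteBlock n bpr g (b, k)).getD t []).length = bpr * n := by
      intro t ht
      rw [rowlen_pvWriteBlock]
      exact hrows t ht
    rw [ih (k + 1) _ (by simp only [List.length_cons] at hk; omega) hg' hrows']
    have hjn : j / n < bpr := (Nat.div_lt_iff_lt_mul hn).2 hj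
    have hkd := Nat.div_add_mod k bpr
    have hkd' : k / bpr * bpr + k % bpr = k := by rw [Nat.mul_comm]; exact hkd
    have hTk : gg (pvWriteBlock n bpr g (b, k)) i j =
        if i / n * bpr + j / n = k then (b.getD (i % n) []).getD (j % n) "" else gg g i j := by
      rw [gg_pvWriteBlock n bpr hn g b k i j hg hrows
        (by simp only [List.length_cons] at hk; omega) hi hj]
      by_cases hc : i / n = k / bpr ∧ j / n = k % bpr
      · have he : i / n * bpr + j / n = k := by rw [hc.1, hc.2]; exact hkd'
        rw [if_pos hc, if_pos he]
      · rw [if_neg hc, if_neg]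
        intro h
        have h2 : i / n * bpr + j / n = k / bpr * bpr + k % bpr := by omega
        exact hc (div_mod_unique' (i / n) (j / n) (k / bpr) (k % bpr) bpr hjn
          (Nat.mod_lt _ hbpr) h2)
    rw [hTk]
    by_cases hc0 : i / n * bpr + j / n = k
    · rw [if_neg (by omega), if_pos hc0,
        if_pos (by simp only [List.length_cons]; omega)]
      have h0 : i / n * bpr + j / n - k = 0 := by omega
      rw [h0, List.getD_cons_zero]
    · by_cases hc1 : k + 1 ≤ i / n * bpr + j / n ∧ i / n * bpr + j / n < k + 1 + bs.length
      · rw [if_pos hc1, if_pos (by simp only [List.length_cons]; omega)]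
        obtain ⟨m, hm⟩ : ∃ m, i / n * bpr + j / n - k = m + 1 :=
          ⟨i / n * bpr + j / n - (k + 1), by omega⟩
        rw [hm, List.getD_cons_succ]
        have hm2 : i / n * bpr + j / n - (k + 1) = m := by omega
        rw [hm2]
      · rw [if_neg hc1, if_neg hc0,
          if_neg (by simp only [List.length_cons]; omega)]

-- grid equality from cell-level equality
theorem eq_of_gg (X Y : List (List String)) (hlen : X.length = Y.length)
    (hrow : ∀ i, i < X.length → (X.getD i []).length = (Y.getD i []).length)
    (hcell : ∀ i j, i < X.length → j < (X.getD i []).length → gg X i j = gg Y i j) :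
    X = Y := by
  apply List.ext_getElem hlen
  intro i h1 h2
  apply List.ext_getElem
  · have h3 := hrow i h1
    rw [List.getD_eq_getElem X [] h1, List.getD_eq_getElem Y [] h2] at h3
    exact h3
  · intro j hj1 hj2
    have hj1' : j < (X.getD i []).length := by
      rw [List.getD_eq_getElem X [] h1]; exact hj1
    have h4 := hcell i j h1 hj1'
    unfold gg at h4
    rw [List.getD_eq_getElem X [] h1, List.getD_eq_getElem Y [] h2] at h4
    rw [List.getD_eq_getElem _ "" hj1, List.getD_eq_getElem _ "" hj2] at h4
    exact h4

theorem pvCF_length (blocks : List (List (List String))) (n bpr : Nat) :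
    (pvCF blocks n bpr).length = bpr * n := by
  simp [pvCF]

theorem pvCF_row (blocks : List (List (List String))) (n bpr i : Nat) (hi : i < bpr * n) :
    (pvCF blocks n bpr).getD i [] =
      (List.range (bpr * n)).map (fun j => pvV blocks n bpr i j) := by
  unfold pvCF
  rw [List.getD_eq_getElem _ [] (by simpa using hi)]
  rw [List.getElem_map, List.getElem_range]

theorem pvCF_cell (blocks : List (List (List String))) (n bpr i j : Nat)
    (hi : i < bpr * n) (hj : j < bpr * n) :
    gg (pvCF blocks n bpr) i j = pvV blocks n bpr i j := by
  unfold gg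
  rw [pvCF_row blocks n bpr i hi]
  rw [List.getD_eq_getElem _ "" (by simpa using hj)]
  rw [List.getElem_map, List.getElem_range]

theorem A_eq_CF (blocks : List (List (List String))) (hne : blocks ≠ [])
    (hsq : Nat.sqrt blocks.length * Nat.sqrt blocks.length = blocks.length) :
    combine_blocks blocks = pvCF blocks ((blocks.headD []).length) (Nat.sqrt blocks.length) := by
  have hguard : ¬(Nat.sqrt blocks.length * Nat.sqrt blocks.length ≠ blocks.length) := by
    rw [hsq]; simp
  unfold combine_blocks
  rw [if_neg hne]
  simp only []
  rw [if_neg hguard]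
  set n := (blocks.headD []).length with hn'
  set bpr := Nat.sqrt blocks.length with hbpr'
  set init := List.replicate (bpr * n) (List.replicate (bpr * n) "") with hinit'
  have hglen : init.length = bpr * n := by simp [hinit']
  have hgrows : ∀ t, t < bpr * n → (init.getD t []).length = bpr * n := by
    intro t ht
    rw [hinit', List.getD_eq_getElem _ [] (by simpa using ht)]
    simp
  clear_value n bpr init
  apply eq_of_gg
  · rw [len_foldTop, hglen, pvCF_length]
  · intro i hi
    rw [len_foldTop, hglen] at hi
    rw [rowlen_foldTop, hgrows i hi, pvCF_row blocks n bpr i hi]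
    simp
  · intro i j hi hj
    rw [len_foldTop, hglen] at hi
    rw [rowlen_foldTop, hgrows i hi] at hj
    have hn : 0 < n := by
      rcases Nat.eq_zero_or_pos n with h | h
      · rw [h, Nat.mul_zero] at hi; omega
      · exact h
    have hdi : i / n < bpr := (Nat.div_lt_iff_lt_mul hn).2 hi
    have hdj : j / n < bpr := (Nat.div_lt_iff_lt_mul hn).2 hj
    have hT : i / n * bpr + j / n < bpr * bpr := by
      have h5 : (i / n + 1) * bpr ≤ bpr * bpr := Nat.mul_le_mul_right bpr (by omega)
      rw [add_one_mul] at h5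
      omega
    rw [gg_foldTop n bpr hn blocks 0 init i j (by omega) hglen hgrows hi hj]
    rw [if_pos ⟨Nat.zero_le _, by omega⟩]
    rw [pvCF_cell blocks n bpr i j hi hj]
    simp only [Nat.sub_zero]
    rfl

theorem flatMap_range_eq_map {α : Type} (n a : Nat) (f : Nat → Nat → α) :
    (List.range a).flatMap (fun p => (List.range n).map (f p)) =
      (List.range (a * n)).map (fun i => f (i / n) (i % n)) := by
  induction a with
  | zero => simp
  | succ a ih =>
    rw [List.range_succ, List.flatMap_append, ih]
    have h1 : (a + 1) * n = a * n + n := by ring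
    rw [h1, List.range_add, List.map_append, List.map_map]
    congr 1
    · simp only [List.flatMap_cons, List.flatMap_nil, List.append_nil]
      apply List.map_congr_left
      intro q hq
      have hqn : q < n := List.mem_range.1 hq
      have hn : 0 < n := by omega
      have hdiv : (a * n + q) / n = a := by
        rw [Nat.mul_comm a n, Nat.mul_add_div hn, Nat.div_eq_of_lt hqn, Nat.add_zero]
      have hmod : (a * n + q) % n = q := by
        rw [Nat.mul_comm a n, Nat.mul_add_mod, Nat.mod_eq_of_lt hqn]
      simp [Function.comp, hdiv, hmod]

theorem band_eq (blocks : List (List (List String))) (a m : Nat) (h : a + m ≤ blocks.length) :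
    (blocks.drop a).take m = (List.range m).map (fun k => blocks.getD (a + k) []) := by
  apply List.ext_getElem
  · simp only [List.length_take, List.length_drop, List.length_map, List.length_range]
    omega
  · intro k h1 h2
    have hk : k < m := by simpa using h2
    rw [List.getElem_take, List.getElem_drop]
    rw [List.getElem_map, List.getElem_range]
    rw [List.getD_eq_getElem _ [] (by omega)]

theorem B_eq_CF (blocks : List (List (List String))) (hne : blocks ≠ [])
    (hsq : Nat.sqrt blocks.length * Nat.sqrt blocks.length = blocks.length) :
    combine_blocks_alt blocks = pvCF blocks ((blocks.headD []).length) (Nat.sqrt blocks.length) := by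
  have hguard : ¬(Nat.sqrt blocks.length * Nat.sqrt blocks.length ≠ blocks.length) := by
    rw [hsq]; simp
  unfold combine_blocks_alt
  rw [if_neg hne]
  simp only []
  rw [if_neg hguard]
  set n := (blocks.headD []).length with hn'
  set bpr := Nat.sqrt blocks.length with hbpr'
  have hinner : ∀ (band : List (List (List String))) (acc : List (List String)),
      (List.range n).foldl (fun comb r => comb ++ [pvBandRow n band r]) acc =
        acc ++ (List.range n).map (pvBandRow n band) := by
    intro band acc
    exact PySem.List.foldl_append_singleton_eq_map (pvBandRow n band) (List.range n) acc
  have houter : (List.range bpr).foldl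
      (fun comb br =>
        (List.range n).foldl
          (fun comb r => comb ++ [pvBandRow n ((blocks.drop (br * bpr)).take bpr) r]) comb) [] =
      (List.range bpr).flatMap
        (fun br => (List.range n).map (pvBandRow n ((blocks.drop (br * bpr)).take bpr))) := by
    have hcong : (List.range bpr).foldl
        (fun comb br =>
          (List.range n).foldl
            (fun comb r => comb ++ [pvBandRow n ((blocks.drop (br * bpr)).take bpr) r]) comb) [] =
        (List.range bpr).foldl
          (fun comb br =>
            comb ++ (List.range n).map (pvBandRow n ((blocks.drop (br * bpr)).take bpr))) [] := by
      apply List.foldl_ext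
      intro acc x _
      exact hinner _ acc
    rw [hcong]
    exact PySem.List.foldl_append_eq_flatMap _ _ []
  rw [houter]
  have hrow : ∀ br ∈ List.range bpr,
      (List.range n).map (pvBandRow n ((blocks.drop (br * bpr)).take bpr)) =
        (List.range n).map (fun r =>
          (List.range (bpr * n)).map (fun j =>
            ((blocks.getD (br * bpr + j / n) []).getD r []).getD (j % n) "")) := by
    intro br hbr
    have hbr' : br < bpr := List.mem_range.1 hbr
    apply List.map_congr_left
    intro r _
    unfold pvBandRow
    have hband : (blocks.drop (br * bpr)).take bpr =
        (List.range bpr).map (fun k => blocks.getD (br * bpr + k) []) := by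
      apply band_eq
      have h1 : (br + 1) * bpr ≤ bpr * bpr := Nat.mul_le_mul_right bpr (by omega)
      rw [add_one_mul] at h1
      omega
    rw [hband, List.flatMap_map]
    exact flatMap_range_eq_map n bpr _
  rw [List.flatMap_congr hrow]
  rw [flatMap_range_eq_map n bpr
    (fun br r => (List.range (bpr * n)).map (fun j =>
      ((blocks.getD (br * bpr + j / n) []).getD r []).getD (j % n) ""))]
  rfl

-- ===== VERDICT (by name: the statement is the Claim_ definition above) =====
theorem combine_blocks_spec : Claim_equal_combine_blocks := by
  intro blocks _hdom hpre
  unfold Spec_combine_blocks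
  by_cases hne : blocks = []
  · subst hne
    rfl
  · rcases hpre with h | ⟨⟨k, _hk, hkk⟩, _⟩
    · exact absurd h hne
    · have hsq : Nat.sqrt blocks.length * Nat.sqrt blocks.length = blocks.length := by
        have h1 : Nat.sqrt blocks.length = k := by rw [← hkk, ← pow_two, Nat.sqrt_eq']
        rw [h1, hkk]
      rw [A_eq_CF blocks hne hsq, B_eq_CF blocks hne hsq]
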